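-- pv_equiv track=rewrite | github.com/florianbuetow/coding-challenges | leetcode/easy/3852. Smallest Pair With Different Frequencies.py | minDistinctFreqPair
-- ===== SOURCE A (Python) =====
-- from collections import defaultdict
--
-- def minDistinctFreqPair(nums: list[int]) -> list[int]:
--     # O(n*n) time and O(n) space
--     frequencies = defaultdict(int)
--     for n in nums:
--         frequencies[n] += 1
--     inverted_frequencies = defaultdict(list)
--
--     nums = sorted(frequencies.keys())
--     for i in range(len(nums)):
--         for j in range(i+1, len(nums)):
--             x, y = nums[i], nums[j]
--             if frequencies[x] != frequencies[y]:
--                 return [x, y]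
--     return [-1, -1]
-- ===== SOURCE B (Python) =====
-- from collections import Counter
--
-- def minDistinctFreqPair(nums: list[int]) -> list[int]:
--     # No sort of all keys: the answer's first element is always the smallest
--     # distinct value, the second the smallest value whose frequency differs.
--     freq = Counter(nums)
--     if not freq:
--         return [-1, -1]
--     m = min(freq)
--     fm = freq[m]
--     cand = [y for y in freq if freq[y] != fm]
--     if not cand:
--         return [-1, -1]
--     return [m, min(cand)]
-- ===== Notes on version B (the rewrite author's own statement) =====
-- stated objective: alternative
-- what changed: Replaces A's sort of all distinct values plus nested pairwise index scan by Counter + min + one linear filter pass: the answer, when it exists, is always [min key, min key with a different frequency], so no sort and no pairwise scan is needed.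
import Mathlib
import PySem

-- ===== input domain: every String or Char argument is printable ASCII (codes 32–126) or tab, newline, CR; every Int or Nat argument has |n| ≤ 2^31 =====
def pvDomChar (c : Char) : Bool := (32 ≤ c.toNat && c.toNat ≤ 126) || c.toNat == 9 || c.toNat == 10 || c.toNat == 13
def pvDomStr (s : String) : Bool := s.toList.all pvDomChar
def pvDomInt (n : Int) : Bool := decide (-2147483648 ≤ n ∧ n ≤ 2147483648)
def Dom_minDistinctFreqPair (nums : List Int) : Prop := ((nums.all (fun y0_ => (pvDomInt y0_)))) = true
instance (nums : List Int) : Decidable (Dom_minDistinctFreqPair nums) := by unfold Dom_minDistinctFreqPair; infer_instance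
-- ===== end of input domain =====

-- B (alternative algorithm): instead of sorting the distinct values and scanning all
-- pairs, it takes the minimum key and the minimum key of differing frequency directly.

-- ===== PORT A =====
-- outer loop over i (the list tail IS nums[i:], so the inner j-loop is a scan of the tail)
def pvGoA (freq : PySem.Dict Int Int) : List Int → List Int
  | [] => [-1, -1]
  | x :: rest =>
    match rest.find? (fun y => freq.getD y 0 != freq.getD x 0) with
    | some y => [x, y]
    | none => pvGoA freq rest

def minDistinctFreqPair (nums : List Int) : List Int :=
  let frequencies := nums.foldl (fun d n => d.modify n 0 (· + 1)) PySem.Dict.empty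
  let nums2 := PySem.List.sorted frequencies.keys (fun x => x) false
  pvGoA frequencies nums2

-- ===== PORT B =====
def minDistinctFreqPair_alt (nums : List Int) : List Int :=
  let freq := PySem.Dict.counter nums
  match PySem.List.min? freq.keys (fun y => y) with
  | none => [-1, -1]          -- "if not freq"
  | some m =>
    let fm := freq.getD m 0
    let cand := freq.keys.filter (fun y => freq.getD y 0 != fm)
    match PySem.List.min? cand (fun y => y) with
    | none => [-1, -1]        -- "if not cand"
    | some c => [m, c]

-- ===== PRECONDITION & SPEC =====
def Spec_minDistinctFreqPair (nums : List Int) (out : List Int) : Prop := out = minDistinctFreqPair_alt nums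
instance (nums : List Int) (out : List Int) : Decidable (Spec_minDistinctFreqPair nums out) := by unfold Spec_minDistinctFreqPair; infer_instance

-- ===== CLAIM (what is proved, stated in full; the proofs are below) =====
def Claim_equal_minDistinctFreqPair : Prop := ∀ (nums : List Int), Dom_minDistinctFreqPair nums → Spec_minDistinctFreqPair nums (minDistinctFreqPair nums)

-- ===== LEMMAS AND PROOFS =====

-- If every element of l has the same frequency c, A's remaining outer iterations find nothing.
theorem pvGoA_const (freq : PySem.Dict Int Int) (c : Int) :
    ∀ l : List Int, (∀ y ∈ l, freq.getD y 0 = c) → pvGoA freq l = [-1, -1] := by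
  intro l
  induction l with
  | nil => intro _; rfl
  | cons x rest ih =>
    intro h
    have hfind : rest.find? (fun y => freq.getD y 0 != freq.getD x 0) = none := by
      rw [List.find?_eq_none]
      intro y hy
      simp [h y (List.mem_cons_of_mem _ hy), h x (List.mem_cons_self)]
    simp [pvGoA, hfind]
    exact ih (fun y hy => h y (List.mem_cons_of_mem _ hy))

-- min? (no key) returns the unique least element.
theorem pv_min?_eq (l : List Int) (m : Int) (hm : m ∈ l) (hle : ∀ y ∈ l, m ≤ y) :
    PySem.List.min? l (fun y => y) = some m := by
  cases hq : PySem.List.min? l (fun y => y) with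
  | none =>
    rw [PySem.List.min?_eq_none_iff] at hq
    simp [hq] at hm
  | some v =>
    have hv := PySem.List.min?_mem hq
    have h1 := PySem.List.min?_isMin hq m hm
    have h2 := hle v hv
    have : v = m := le_antisymm h1 h2
    simp [this]

theorem minDistinctFreqPair_eq_alt (nums : List Int) :
    minDistinctFreqPair nums = minDistinctFreqPair_alt nums := by
  show pvGoA (PySem.Dict.counter nums)
        (PySem.List.sorted (PySem.Dict.counter nums).keys (fun x => x) false) =
      (match PySem.List.min? (PySem.Dict.counter nums).keys (fun y => y) with
       | none => [-1, -1]
       | some m =>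
         match PySem.List.min?
             ((PySem.Dict.counter nums).keys.filter
               (fun y => (PySem.Dict.counter nums).getD y 0 != (PySem.Dict.counter nums).getD m 0))
             (fun y => y) with
         | none => [-1, -1]
         | some c => [m, c])
  set freq := PySem.Dict.counter nums with hfreq
  have hkeys : freq.keys = PySem.Set.ofList nums := PySem.Dict.keys_counter nums
  have hperm : (PySem.List.sorted freq.keys (fun x => x) false).Perm freq.keys :=
    PySem.List.sorted_perm _ _ _
  have hlt : (PySem.List.sorted freq.keys (fun x => x) false).Pairwise (· < ·) := by
    rw [hkeys]; exact PySem.List.sorted_ofList_pairwise_lt nums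
  cases hs : PySem.List.sorted freq.keys (fun x => x) false with
  | nil =>
    have hk : freq.keys = [] := by
      have := hperm; rw [hs] at this
      exact (List.Perm.nil_eq this).symm
    rw [hk]
    simp [pvGoA, PySem.List.min?]
  | cons x rest =>
    rw [hs] at hperm hlt
    -- min of the keys is x
    have hxmem : x ∈ freq.keys := hperm.mem_iff.mp (List.mem_cons_self)
    have hxle : ∀ y ∈ freq.keys, x ≤ y := by
      intro y hy
      have := PySem.List.key_head_sorted_le freq.keys (fun x : Int => x) hs y hy
      simpa using this
    rw [pv_min?_eq freq.keys x hxmem hxle]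
    set p : Int → Bool := fun y => freq.getD y 0 != freq.getD x 0 with hp
    have hpx : p x = false := by simp [hp]
    have hfilt : (freq.keys.filter p).Perm (rest.filter p) := by
      have := (hperm.symm).filter p
      simpa [List.filter, hpx] using this
    cases hfind : rest.find? p with
    | none =>
      -- all remaining keys have the same frequency: both return [-1,-1]
      have hall : ∀ y ∈ rest, freq.getD y 0 = freq.getD x 0 := by
        rw [List.find?_eq_none] at hfind
        intro y hy
        have := hfind y hy
        simpa [hp] using this
      have hgo : pvGoA freq (x :: rest) = [-1, -1] := by
        simp [pvGoA, ← hp, hfind]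
        exact pvGoA_const freq (freq.getD x 0) rest hall
      have hflr : rest.filter p = [] := by
        rw [List.filter_eq_nil_iff]; intro y hy; simp [hp, hall y hy]
      have hfl : freq.keys.filter p = [] := by
        have := hfilt; rw [hflr] at this
        exact List.Perm.eq_nil this
      rw [hgo]
      show ([-1, -1] : List Int) =
        (match PySem.List.min? (freq.keys.filter p) (fun y => y) with
         | none => ([-1, -1] : List Int)
         | some c => [x, c])
      rw [hfl]
      simp [PySem.List.min?]
    | some y =>
      -- A returns [x, y]; y is the least candidate, so B does too
      have hgo : pvGoA freq (x :: rest) = [x, y] := by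
        simp [pvGoA, ← hp, hfind]
      rw [hgo]
      have hhead : (rest.filter p).head? = some y := by
        rw [List.head?_filter, hfind]
      have hymem : y ∈ freq.keys.filter p := by
        apply hfilt.mem_iff.mpr
        exact List.mem_of_mem_head? hhead
      have hrle : rest.Pairwise (· ≤ ·) :=
        (List.pairwise_cons.mp (hlt.imp (fun h => le_of_lt h))).2
      have hyle : ∀ z ∈ freq.keys.filter p, y ≤ z := by
        intro z hz
        have hz' : z ∈ rest.filter p := hfilt.mem_iff.mp hz
        have hpf : (rest.filter p).Pairwise (· ≤ ·) := hrle.filter p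
        cases hcf : rest.filter p with
        | nil => rw [hcf] at hz'; simp at hz'
        | cons h t =>
          rw [hcf] at hhead hz' hpf
          simp at hhead
          subst hhead
          rcases List.mem_cons.mp hz' with rfl | hzt
          · exact le_refl _
          · exact (List.pairwise_cons.mp hpf).1 z hzt
      show ([x, y] : List Int) =
        (match PySem.List.min? (freq.keys.filter p) (fun y => y) with
         | none => ([-1, -1] : List Int)
         | some c => [x, c])
      rw [pv_min?_eq _ y hymem hyle]

-- ===== VERDICT (by name: the statement is the Claim_ definition above) =====
theorem minDistinctFreqPair_spec : Claim_equal_minDistinctFreqPair := by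
  intro nums _
  unfold Spec_minDistinctFreqPair
  exact minDistinctFreqPair_eq_alt nums
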